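-- pv_equiv track=rewrite | github.com/chansg/bdo-analytics | bdo-intelligence/api/market.py | summarize_data_health
-- ===== SOURCE A (Python) =====
-- from typing import Any, Optional
--
-- def summarize_data_health(statuses: list[dict[str, Any]]) -> dict[str, Any]:
--     """
--     Summarize several endpoint statuses into one dashboard health state.
--
--     A single banner that says only LIVE or MOCK can be misleading. For example,
--     Cooking/Alchemy category data may be live while Hot Items is using mock
--     fallback because the upstream endpoint is blocked. This helper makes that
--     mixed state explicit.
--     """
--     known_statuses = [status for status in statuses if status.get("source") != "unknown"]
--     if not known_statuses:
--         return {
--             "state": "UNKNOWN",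
--             "message": "Data source will appear after the first load.",
--             "icon": "ℹ️",
--         }
--
--     sources = {status.get("source") for status in known_statuses}
--     if sources == {"live"}:
--         return {
--             "state": "LIVE",
--             "message": "All loaded endpoints are live via arsha.io.",
--             "icon": "🟢",
--         }
--     if "live" in sources and "mock" in sources:
--         return {
--             "state": "PARTIAL LIVE",
--             "message": "Some endpoints are live; unavailable endpoints are using fallback data.",
--             "icon": "🟠",
--         }
--     if sources == {"mock"}:
--         return {
--             "state": "MOCK",
--             "message": "Using offline sample data because live endpoints are unavailable.",
--             "icon": "🟡",
--         }
--     return {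
--         "state": "PARTIAL DATA",
--         "message": "Some endpoint statuses are incomplete.",
--         "icon": "ℹ️",
--     }
-- ===== SOURCE B (Python) =====
-- _TABLE = (
--     {"state": "UNKNOWN", "message": "Data source will appear after the first load.", "icon": "\u2139\ufe0f"},          # 0: nothing known
--     {"state": "LIVE", "message": "All loaded endpoints are live via arsha.io.", "icon": "\U0001f7e2"},                # 1: live only
--     {"state": "MOCK", "message": "Using offline sample data because live endpoints are unavailable.", "icon": "\U0001f7e1"},  # 2: mock only
--     {"state": "PARTIAL LIVE", "message": "Some endpoints are live; unavailable endpoints are using fallback data.", "icon": "\U0001f7e0"},  # 3: live+mock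
--     {"state": "PARTIAL DATA", "message": "Some endpoint statuses are incomplete.", "icon": "\u2139\ufe0f"},           # 4: other only
--     {"state": "PARTIAL DATA", "message": "Some endpoint statuses are incomplete.", "icon": "\u2139\ufe0f"},           # 5: live+other
--     {"state": "PARTIAL DATA", "message": "Some endpoint statuses are incomplete.", "icon": "\u2139\ufe0f"},           # 6: mock+other
--     {"state": "PARTIAL LIVE", "message": "Some endpoints are live; unavailable endpoints are using fallback data.", "icon": "\U0001f7e0"},  # 7: live+mock+other
-- )
--
-- def summarize_data_health(statuses):
--     mask = 0
--     for status in statuses: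
--         src = status.get("source")
--         if src != "unknown":
--             mask |= 1 << (0 if src == "live" else 1 if src == "mock" else 2)
--     return dict(_TABLE[mask])
-- ===== Notes on version B (the rewrite author's own statement) =====
-- stated objective: alternative
-- what changed: Replaces A's intermediate known_statuses list, set of sources and chain of set-equality/membership branches by an arithmetic encoding: one fold ORs each known source into a 3-bit mask (live=1, mock=2, other=4) and the result is a single lookup in a precomputed 8-entry table, with no branches for classification.
import Mathlib
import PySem

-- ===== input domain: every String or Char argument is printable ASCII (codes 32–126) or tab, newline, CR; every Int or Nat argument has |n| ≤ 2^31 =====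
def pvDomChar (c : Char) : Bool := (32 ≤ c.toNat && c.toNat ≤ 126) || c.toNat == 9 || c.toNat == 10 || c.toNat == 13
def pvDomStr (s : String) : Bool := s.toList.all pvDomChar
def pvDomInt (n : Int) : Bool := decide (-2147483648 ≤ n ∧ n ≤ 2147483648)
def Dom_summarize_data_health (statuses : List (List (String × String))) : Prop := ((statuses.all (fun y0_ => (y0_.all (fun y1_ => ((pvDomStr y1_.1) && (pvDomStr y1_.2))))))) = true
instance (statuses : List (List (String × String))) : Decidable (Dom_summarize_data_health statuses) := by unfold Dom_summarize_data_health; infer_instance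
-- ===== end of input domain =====

-- B replaces A's known-list + set-of-sources + branch chain by a 3-bit mask folded over the
-- statuses and a single lookup in a precomputed 8-entry table (alternative decomposition, same cost).

-- shared lookup (Python's status.get("source"))
def pvSrc (status : List (String × String)) : Option String :=
  PySem.Dict.get? (PySem.Dict.mk status) "source"

def pvUNKNOWN : List (String × String) :=
  [("state", "UNKNOWN"), ("message", "Data source will appear after the first load."), ("icon", "ℹ️")]
def pvLIVE : List (String × String) :=
  [("state", "LIVE"), ("message", "All loaded endpoints are live via arsha.io."), ("icon", "🟢")]
def pvPARTIALLIVE : List (String × String) :=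
  [("state", "PARTIAL LIVE"), ("message", "Some endpoints are live; unavailable endpoints are using fallback data."), ("icon", "🟠")]
def pvMOCK : List (String × String) :=
  [("state", "MOCK"), ("message", "Using offline sample data because live endpoints are unavailable."), ("icon", "🟡")]
def pvPARTIALDATA : List (String × String) :=
  [("state", "PARTIAL DATA"), ("message", "Some endpoint statuses are incomplete."), ("icon", "ℹ️")]

-- ===== PORT A =====
def summarize_data_health (statuses : List (List (String × String))) : List (String × String) :=
  let known := statuses.filter (fun st => !(pvSrc st == some "unknown"))
  if known.isEmpty then pvUNKNOWN
  else
    let sources : PySem.Set (Option String) := PySem.Set.ofList (known.map pvSrc)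
    if PySem.Set.equal sources (PySem.Set.ofList [some "live"]) then pvLIVE
    else if PySem.Set.contains sources (some "live") && PySem.Set.contains sources (some "mock") then pvPARTIALLIVE
    else if PySem.Set.equal sources (PySem.Set.ofList [some "mock"]) then pvMOCK
    else pvPARTIALDATA

-- ===== PORT B =====
-- B's table indexed by the mask (live bit = 1, mock bit = 2, other bit = 4)
def pvTable : List (List (String × String)) :=
  [pvUNKNOWN, pvLIVE, pvMOCK, pvPARTIALLIVE, pvPARTIALDATA, pvPARTIALDATA, pvPARTIALDATA, pvPARTIALLIVE]

def pvMaskStep (m : Nat) (status : List (String × String)) : Nat :=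
  let src := pvSrc status
  if src == some "unknown" then m
  else m ||| (1 <<< (if src == some "live" then 0 else if src == some "mock" then 1 else 2))

def summarize_data_health_alt (statuses : List (List (String × String))) : List (String × String) :=
  let mask := statuses.foldl pvMaskStep 0
  pvTable.getD mask pvUNKNOWN   -- mask < 8 always; getD only totalizes the index

-- ===== PRECONDITION & SPEC =====
def Spec_summarize_data_health (statuses : List (List (String × String))) (out : List (String × String)) : Prop := out = summarize_data_health_alt statuses
instance (statuses : List (List (String × String))) (out : List (String × String)) : Decidable (Spec_summarize_data_health statuses out) := by unfold Spec_summarize_data_health; infer_instance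

-- ===== CLAIM (what is proved, stated in full; the proofs are below) =====
def Claim_equal_summarize_data_health : Prop := ∀ (statuses : List (List (String × String))), Dom_summarize_data_health statuses → Spec_summarize_data_health statuses (summarize_data_health statuses)

-- ===== LEMMAS AND PROOFS =====

def pvKnown (st : List (String × String)) : Bool := !(pvSrc st == some "unknown")
def pvIsL (st : List (String × String)) : Bool := pvSrc st == some "live"
def pvIsM (st : List (String × String)) : Bool := pvSrc st == some "mock"
def pvIsO (st : List (String × String)) : Bool := !(pvIsL st) && !(pvIsM st)

-- the mask computed by B's fold, as a function of the three "any" flags over the known statuses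
def pvEnc (l : List (List (String × String))) : Nat :=
  (if (l.filter pvKnown).any pvIsL then 1 else 0) |||
  (if (l.filter pvKnown).any pvIsM then 2 else 0) |||
  (if (l.filter pvKnown).any pvIsO then 4 else 0)

theorem foldl_pvMaskStep (l : List (List (String × String))) (m : Nat) :
    l.foldl pvMaskStep m = m ||| pvEnc l := by
  induction l generalizing m with
  | nil => simp [pvEnc]
  | cons x xs ih =>
    rw [List.foldl_cons, ih]
    unfold pvEnc
    rw [List.filter_cons]
    by_cases hu : pvSrc x == some "unknown"
    · have hk : pvKnown x = false := by simp [pvKnown, hu]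
      rw [hk, pvMaskStep, if_pos hu]
      simp
    · have hk : pvKnown x = true := by simp [pvKnown, hu]
      rw [hk, if_pos rfl, List.any_cons, List.any_cons, List.any_cons, pvMaskStep, if_neg hu]
      by_cases hl : pvSrc x == some "live"
      · have hL : pvIsL x = true := hl
        have hM : pvIsM x = false := by
          simp only [beq_iff_eq] at hl; simp [pvIsM, hl]
        have hO : pvIsO x = false := by simp [pvIsO, pvIsL, hl]
        rw [if_pos hl, hL, hM, hO]
        simp only [Bool.true_or, Bool.false_or, if_pos rfl]
        rcases (xs.filter pvKnown).any pvIsL with _ | _ <;>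
          rcases (xs.filter pvKnown).any pvIsM with _ | _ <;>
          rcases (xs.filter pvKnown).any pvIsO with _ | _ <;>
          simp only [if_pos rfl, if_neg (Bool.false_ne_true), Nat.shiftLeft_zero] <;>
          rw [Nat.or_assoc] <;> congr 1 <;> decide
      · by_cases hm : pvSrc x == some "mock"
        · have hL : pvIsL x = false := by simpa [pvIsL] using hl
          have hM : pvIsM x = true := hm
          have hO : pvIsO x = false := by simp [pvIsO, pvIsM, hm]
          rw [if_neg hl, if_pos hm, hL, hM, hO]
          simp only [Bool.true_or, Bool.false_or, if_pos rfl]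
          rcases (xs.filter pvKnown).any pvIsL with _ | _ <;>
            rcases (xs.filter pvKnown).any pvIsM with _ | _ <;>
            rcases (xs.filter pvKnown).any pvIsO with _ | _ <;>
            simp only [if_pos rfl, if_neg (Bool.false_ne_true)] <;>
            rw [Nat.or_assoc] <;> congr 1 <;> decide
        · have hL : pvIsL x = false := by simpa [pvIsL] using hl
          have hM : pvIsM x = false := by simpa [pvIsM] using hm
          have hO : pvIsO x = true := by simp [pvIsO, hL, hM]
          rw [if_neg hl, if_neg hm, hL, hM, hO]
          simp only [Bool.true_or, Bool.false_or, if_pos rfl]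
          rcases (xs.filter pvKnown).any pvIsL with _ | _ <;>
            rcases (xs.filter pvKnown).any pvIsM with _ | _ <;>
            rcases (xs.filter pvKnown).any pvIsO with _ | _ <;>
            simp only [if_pos rfl, if_neg (Bool.false_ne_true)] <;>
            rw [Nat.or_assoc] <;> congr 1 <;> decide

theorem contains_src (k : List (List (String × String))) (t : Option String) :
    PySem.Set.contains (PySem.Set.ofList (k.map pvSrc)) t = k.any (fun st => pvSrc st == t) := by
  rw [Bool.eq_iff_iff, PySem.Set.contains_iff, PySem.Set.mem_ofList, List.mem_map,
    List.any_eq_true]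
  constructor
  · rintro ⟨st, hst, rfl⟩; exact ⟨st, hst, by simp⟩
  · rintro ⟨st, hst, h⟩; exact ⟨st, hst, by simpa using h⟩

theorem equal_single (k : List (List (String × String))) (t : Option String) (hk : k ≠ []) :
    (PySem.Set.equal (PySem.Set.ofList (k.map pvSrc)) (PySem.Set.ofList [t]) = true)
      ↔ (∀ st ∈ k, pvSrc st = t) := by
  rw [PySem.Set.equal_iff]
  constructor
  · intro h st hst
    have := (h (pvSrc st)).mp (by rw [PySem.Set.mem_ofList]; exact List.mem_map_of_mem hst)
    simpa [PySem.Set.mem_ofList] using this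
  · intro h x
    simp only [PySem.Set.mem_ofList, List.mem_map, List.mem_singleton]
    constructor
    · rintro ⟨st, hst, rfl⟩; exact h st hst
    · rintro rfl
      obtain ⟨st, hst⟩ := List.exists_mem_of_ne_nil k hk
      exact ⟨st, hst, h st hst⟩

theorem all_eq_live_iff (k : List (List (String × String))) (hk : k ≠ []) :
    (∀ st ∈ k, pvSrc st = some "live")
      ↔ (k.any pvIsL = true ∧ k.any pvIsM = false ∧ k.any pvIsO = false) := by
  constructor
  · intro h
    refine ⟨?_, ?_, ?_⟩
    · obtain ⟨st, hst⟩ := List.exists_mem_of_ne_nil k hk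
      exact List.any_eq_true.mpr ⟨st, hst, by simp [pvIsL, h st hst]⟩
    · simp only [List.any_eq_false]
      intro st hst; simp [pvIsM, h st hst]
    · simp only [List.any_eq_false]
      intro st hst; simp [pvIsO, pvIsL, h st hst]
  · rintro ⟨-, hm, ho⟩ st hst
    have hm' := List.any_eq_false.mp hm st hst
    have ho' := List.any_eq_false.mp ho st hst
    by_cases h1 : pvSrc st = some "live"
    · exact h1
    · exfalso
      apply ho'
      have h2 : pvSrc st ≠ some "mock" := by simpa [pvIsM] using hm'
      simp [pvIsO, pvIsL, pvIsM, h1, h2]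

theorem all_eq_mock_iff (k : List (List (String × String))) (hk : k ≠ []) :
    (∀ st ∈ k, pvSrc st = some "mock")
      ↔ (k.any pvIsM = true ∧ k.any pvIsL = false ∧ k.any pvIsO = false) := by
  constructor
  · intro h
    refine ⟨?_, ?_, ?_⟩
    · obtain ⟨st, hst⟩ := List.exists_mem_of_ne_nil k hk
      exact List.any_eq_true.mpr ⟨st, hst, by simp [pvIsM, h st hst]⟩
    · simp only [List.any_eq_false]
      intro st hst; simp [pvIsL, h st hst]
    · simp only [List.any_eq_false]
      intro st hst; simp [pvIsO, pvIsM, h st hst]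
  · rintro ⟨-, hl, ho⟩ st hst
    have hl' := List.any_eq_false.mp hl st hst
    have ho' := List.any_eq_false.mp ho st hst
    by_cases h1 : pvSrc st = some "mock"
    · exact h1
    · exfalso
      apply ho'
      have h2 : pvSrc st ≠ some "live" := by simpa [pvIsL] using hl'
      simp [pvIsO, pvIsL, pvIsM, h1, h2]

-- any known element at all ↔ one of the three flags
theorem known_ne_nil_iff (k : List (List (String × String)))
    (hcov : ∀ st ∈ k, pvKnown st = true) :
    k ≠ [] ↔ (k.any pvIsL = true ∨ k.any pvIsM = true ∨ k.any pvIsO = true) := by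
  constructor
  · intro hk
    obtain ⟨st, hst⟩ := List.exists_mem_of_ne_nil k hk
    by_cases hl : pvIsL st = true
    · exact Or.inl (List.any_eq_true.mpr ⟨st, hst, hl⟩)
    · by_cases hm : pvIsM st = true
      · exact Or.inr (Or.inl (List.any_eq_true.mpr ⟨st, hst, hm⟩))
      · refine Or.inr (Or.inr (List.any_eq_true.mpr ⟨st, hst, ?_⟩))
        simp [pvIsO, Bool.eq_false_iff.mpr (hl ∘ id), Bool.eq_false_iff.mpr (hm ∘ id)]
  · rintro (h | h | h) <;>
      { obtain ⟨st, hst, -⟩ := List.any_eq_true.mp h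
        exact List.ne_nil_of_mem hst }

-- ===== VERDICT (by name: the statement is the Claim_ definition above) =====
theorem summarize_data_health_spec : Claim_equal_summarize_data_health := by
  intro statuses _
  unfold Spec_summarize_data_health
  simp only [summarize_data_health, summarize_data_health_alt, foldl_pvMaskStep, Nat.zero_or, pvEnc]
  set k := statuses.filter pvKnown with hkdef
  have hfil : statuses.filter (fun st => !(pvSrc st == some "unknown")) = k := rfl
  rw [hfil, contains_src, contains_src]
  have hLdef : (k.any fun st => pvSrc st == some "live") = k.any pvIsL := rfl
  have hMdef : (k.any fun st => pvSrc st == some "mock") = k.any pvIsM := rfl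
  rw [hLdef, hMdef]
  have hcov : ∀ st ∈ k, pvKnown st = true := fun st hst => List.of_mem_filter hst
  by_cases hk : k = []
  · have : k.any pvIsL = false ∧ k.any pvIsM = false ∧ k.any pvIsO = false := by
      rw [hk]; simp
    rw [this.1, this.2.1, this.2.2]
    simp [hk, pvTable]
  · have hne : k.isEmpty = false := by simp [List.isEmpty_eq_false_iff, hk]
    rcases hl : k.any pvIsL with _ | _ <;> rcases hm : k.any pvIsM with _ | _ <;>
      rcases ho : k.any pvIsO with _ | _
    · -- nothing at all: contradicts k ≠ []
      exact absurd ((known_ne_nil_iff k hcov).mp hk) (by simp [hl, hm, ho])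
    · -- other only: PARTIAL DATA
      have e1 : PySem.Set.equal (PySem.Set.ofList (k.map pvSrc)) (PySem.Set.ofList [some "live"]) = false := by
        apply Bool.eq_false_iff.mpr; intro he
        have := (all_eq_live_iff k hk).mp ((equal_single k _ hk).mp he)
        simp [hl] at this
      have e2 : PySem.Set.equal (PySem.Set.ofList (k.map pvSrc)) (PySem.Set.ofList [some "mock"]) = false := by
        apply Bool.eq_false_iff.mpr; intro he
        have := (all_eq_mock_iff k hk).mp ((equal_single k _ hk).mp he)
        simp [hm] at this
      rw [hne, if_neg (by simp), if_neg (by rw [e1]; simp), if_neg (by simp),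
        if_neg (by rw [e2]; simp)]
      simp [pvTable]
    · -- mock only: MOCK
      have e1 : PySem.Set.equal (PySem.Set.ofList (k.map pvSrc)) (PySem.Set.ofList [some "live"]) = false := by
        apply Bool.eq_false_iff.mpr; intro he
        have := (all_eq_live_iff k hk).mp ((equal_single k _ hk).mp he)
        simp [hl] at this
      have e2 : PySem.Set.equal (PySem.Set.ofList (k.map pvSrc)) (PySem.Set.ofList [some "mock"]) = true :=
        (equal_single k _ hk).mpr ((all_eq_mock_iff k hk).mpr ⟨hm, hl, ho⟩)
      rw [hne, if_neg (by simp), if_neg (by rw [e1]; simp), if_neg (by simp), if_pos e2]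
      simp [pvTable]
    · -- mock + other: PARTIAL DATA
      have e1 : PySem.Set.equal (PySem.Set.ofList (k.map pvSrc)) (PySem.Set.ofList [some "live"]) = false := by
        apply Bool.eq_false_iff.mpr; intro he
        have := (all_eq_live_iff k hk).mp ((equal_single k _ hk).mp he)
        simp [hl] at this
      have e2 : PySem.Set.equal (PySem.Set.ofList (k.map pvSrc)) (PySem.Set.ofList [some "mock"]) = false := by
        apply Bool.eq_false_iff.mpr; intro he
        have := (all_eq_mock_iff k hk).mp ((equal_single k _ hk).mp he)
        simp [ho] at this
      rw [hne, if_neg (by simp), if_neg (by rw [e1]; simp), if_neg (by simp),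
        if_neg (by rw [e2]; simp)]
      simp [pvTable]
    · -- live only: LIVE
      have e1 : PySem.Set.equal (PySem.Set.ofList (k.map pvSrc)) (PySem.Set.ofList [some "live"]) = true :=
        (equal_single k _ hk).mpr ((all_eq_live_iff k hk).mpr ⟨hl, hm, ho⟩)
      rw [hne, if_neg (by simp), if_pos e1]
      simp [pvTable]
    · -- live + other: PARTIAL DATA
      have e1 : PySem.Set.equal (PySem.Set.ofList (k.map pvSrc)) (PySem.Set.ofList [some "live"]) = false := by
        apply Bool.eq_false_iff.mpr; intro he
        have := (all_eq_live_iff k hk).mp ((equal_single k _ hk).mp he)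
        simp [ho] at this
      have e2 : PySem.Set.equal (PySem.Set.ofList (k.map pvSrc)) (PySem.Set.ofList [some "mock"]) = false := by
        apply Bool.eq_false_iff.mpr; intro he
        have := (all_eq_mock_iff k hk).mp ((equal_single k _ hk).mp he)
        simp [hl] at this
      rw [hne, if_neg (by simp), if_neg (by rw [e1]; simp), if_neg (by simp),
        if_neg (by rw [e2]; simp)]
      simp [pvTable]
    · -- live + mock (no other): PARTIAL LIVE
      have e1 : PySem.Set.equal (PySem.Set.ofList (k.map pvSrc)) (PySem.Set.ofList [some "live"]) = false := by
        apply Bool.eq_false_iff.mpr; intro he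
        have := (all_eq_live_iff k hk).mp ((equal_single k _ hk).mp he)
        simp [hm] at this
      rw [hne, if_neg (by simp), if_neg (by rw [e1]; simp), if_pos (by simp)]
      simp [pvTable]
    · -- live + mock + other: PARTIAL LIVE
      have e1 : PySem.Set.equal (PySem.Set.ofList (k.map pvSrc)) (PySem.Set.ofList [some "live"]) = false := by
        apply Bool.eq_false_iff.mpr; intro he
        have := (all_eq_live_iff k hk).mp ((equal_single k _ hk).mp he)
        simp [hm] at this
      rw [hne, if_neg (by simp), if_neg (by rw [e1]; simp), if_pos (by simp)]
      simp [pvTable]
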